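-- pv_equiv track=rewrite | github.com/daniel880423/Member_System | file/hw1/1100435/s1100435_0.py | homework_1
-- ===== SOURCE A (Python) =====
-- def homework_1(nums): # 請同學記得把檔案名稱改成自己的學號(ex.1104813.py)
--     max = 0
--     lens = len(nums)
--     i = 0
--     while i < lens and (lens-i)>max:
--         x = nums[i]
--         count = 1
--         i+=1
--         while i < lens and nums[i] == x:
--             count+=1
--             i+=1
--         if count > max:
--             max = count
--     return max
-- ===== SOURCE B (Python) =====
-- def homework_1(nums):
--     # Phase 1: group the list into maximal runs of equal elements (value, length).
--     runs = []
--     for x in nums: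
--         if runs and runs[-1][0] == x:
--             runs[-1] = (x, runs[-1][1] + 1)
--         else:
--             runs.append((x, 1))
--     # Phase 2: reduce over run lengths.
--     return max((c for _, c in runs), default=0)
-- ===== Notes on version B (the rewrite author's own statement) =====
-- stated objective: alternative
-- what changed: B first groups the list into a list of (value, run-length) pairs in one fold, then takes the maximum run length with max(..., default=0), instead of A's nested index-driven whiles with an early-exit remaining-length bound.
import Mathlib
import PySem

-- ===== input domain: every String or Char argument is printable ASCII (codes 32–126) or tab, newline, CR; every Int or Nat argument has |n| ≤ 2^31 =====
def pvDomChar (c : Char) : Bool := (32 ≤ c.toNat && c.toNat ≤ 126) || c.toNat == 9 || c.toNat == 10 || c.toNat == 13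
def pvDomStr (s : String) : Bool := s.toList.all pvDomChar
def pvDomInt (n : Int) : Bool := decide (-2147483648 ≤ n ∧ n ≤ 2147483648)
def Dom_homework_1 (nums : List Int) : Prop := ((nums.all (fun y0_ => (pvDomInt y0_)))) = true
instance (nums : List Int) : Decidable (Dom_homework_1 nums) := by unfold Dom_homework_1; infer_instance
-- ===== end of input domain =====

-- B groups the list into (value, run-length) pairs in one fold and then reduces
-- with max(..., default=0), instead of A's nested index whiles; same O(n) cost.

-- ===== PORT A =====
-- inner while: 'while i < lens and nums[i] == x: count += 1; i += 1'
-- (the Nat fuel only makes the loop total; the calls the port makes never exhaust it)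
def pvInner (nums : List Int) (lens x : Int) (fuel : Nat) (i count : Int) : Int × Int :=
  match fuel with
  | 0 => (i, count)
  | fuel + 1 =>
    if i < lens ∧ PySem.List.pyGetD nums i 0 = x then
      pvInner nums lens x fuel (i + 1) (count + 1)
    else (i, count)

-- outer while: 'while i < lens and (lens-i) > max: …' (same fuel discipline)
def pvOuter (nums : List Int) (lens : Int) (fuel : Nat) (i mx : Int) : Int :=
  match fuel with
  | 0 => mx
  | fuel + 1 =>
    if i < lens ∧ lens - i > mx then
      let x := PySem.List.pyGetD nums i 0
      let p := pvInner nums lens x nums.length (i + 1) 1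
      pvOuter nums lens fuel p.1 (if p.2 > mx then p.2 else mx)
    else mx

def homework_1 (nums : List Int) : Int :=
  pvOuter nums (PySem.List.len nums) (nums.length + 1) 0 0

-- ===== PORT B =====
-- one step of B's grouping loop (append a new run or bump the last one)
def pvStep (runs : List (Int × Int)) (x : Int) : List (Int × Int) :=
  match runs.getLast? with
  | some (y, c) => if y = x then runs.dropLast ++ [(x, c + 1)] else runs ++ [(x, 1)]
  | none => runs ++ [(x, 1)]

def homework_1_alt (nums : List Int) : Int :=
  let runs := nums.foldl pvStep []
  (PySem.List.max? (runs.map (fun r => r.2)) (fun c => c)).getD 0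

-- ===== PRECONDITION & SPEC =====
def Spec_homework_1 (nums : List Int) (out : Int) : Prop := out = homework_1_alt nums
instance (nums : List Int) (out : Int) : Decidable (Spec_homework_1 nums out) := by unfold Spec_homework_1; infer_instance

-- ===== CLAIM (what is proved, stated in full; the proofs are below) =====
def Claim_equal_homework_1 : Prop := ∀ (nums : List Int), Dom_homework_1 nums → Spec_homework_1 nums (homework_1 nums)

-- ===== LEMMAS AND PROOFS =====

-- canonical description: leading-run length, remainder after it, max run length
def pvLead (x : Int) : List Int → Nat
  | [] => 0
  | y :: ys => if y = x then pvLead x ys + 1 else 0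

def pvRest (x : Int) : List Int → List Int
  | [] => []
  | y :: ys => if y = x then pvRest x ys else y :: ys

theorem pvRest_length_le (x : Int) (l : List Int) : (pvRest x l).length ≤ l.length := by
  induction l with
  | nil => simp [pvRest]
  | cons y ys ih => by_cases h : y = x <;> simp [pvRest, h] <;> omega

def pvMrl : List Int → Int
  | [] => 0
  | y :: ys => max ((pvLead y ys : Int) + 1) (pvMrl (pvRest y ys))
termination_by l => l.length
decreasing_by
  have := pvRest_length_le y ys
  simp
  omega

theorem pvLead_add_rest (x : Int) (l : List Int) :
    pvLead x l + (pvRest x l).length = l.length := by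
  induction l with
  | nil => simp [pvLead, pvRest]
  | cons y ys ih => by_cases h : y = x <;> simp [pvLead, pvRest, h] <;> omega

theorem pvRest_eq_drop (x : Int) (l : List Int) : pvRest x l = l.drop (pvLead x l) := by
  induction l with
  | nil => simp [pvLead, pvRest]
  | cons y ys ih => by_cases h : y = x <;> simp [pvLead, pvRest, h, ih]

theorem pvMrl_nonneg (l : List Int) : 0 ≤ pvMrl l := by
  fun_induction pvMrl with
  | case1 => simp
  | case2 y ys ih => simp [le_max_iff]; left; positivity

theorem pvMrl_le_len (l : List Int) : pvMrl l ≤ (l.length : Int) := by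
  fun_induction pvMrl with
  | case1 => simp
  | case2 y ys ih =>
    have h1 := pvLead_add_rest y ys
    have h2 : pvLead y ys ≤ ys.length := by omega
    simp [max_le_iff]
    constructor
    · omega
    · have : ((pvRest y ys).length : Int) ≤ (ys.length : Int) := by exact_mod_cast pvRest_length_le y ys
      omega

-- ===== A-side characterisation =====
theorem pvInner_eq (nums : List Int) (x : Int) :
    ∀ (s : List Int) (fuel : Nat) (i count : Int), s.length ≤ fuel → 0 ≤ i →
    nums.drop i.toNat = s →
    pvInner nums (nums.length : Int) x fuel i count
      = (i + (pvLead x s : Int), count + (pvLead x s : Int)) := by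
  intro s
  induction s with
  | nil =>
    intro fuel i count _hf h0 hd
    have hlen : nums.length ≤ i.toNat := by
      by_contra h
      have := List.drop_eq_nil_iff.mp hd
      omega
    have hni : ¬ (i < (nums.length : Int) ∧ PySem.List.pyGetD nums i 0 = x) := by
      intro h
      omega
    cases fuel with
    | zero => simp [pvInner, pvLead]
    | succ f => simp [pvInner, hni, pvLead]
  | cons y ys ih =>
    intro fuel i count hf h0 hd
    obtain ⟨f, rfl⟩ : ∃ f, fuel = f + 1 := by
      cases fuel with
      | zero => simp at hf
      | succ f => exact ⟨f, rfl⟩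
    have hlt' : i.toNat < nums.length := by
      by_contra h
      rw [List.drop_eq_nil_iff.mpr (by omega)] at hd
      simp at hd
    have hlt : i < (nums.length : Int) := by omega
    have hget : PySem.List.pyGetD nums i 0 = y := by
      rw [PySem.List.pyGetD_eq_getElem nums 0 h0 (by exact_mod_cast hlt)]
      have : nums[i.toNat] = (nums.drop i.toNat)[0]'(by rw [hd]; simp) := by
        simp
      rw [this]
      simp [hd]
    by_cases hxy : y = x
    · have hd' : nums.drop (i + 1).toNat = ys := by
        have h2 : (nums.drop i.toNat).tail = ys := by rw [hd]; rfl
        rw [List.tail_drop] at h2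
        rw [show (i + 1).toNat = i.toNat + 1 from by omega]
        exact h2
      have hcond : i < (nums.length : Int) ∧ PySem.List.pyGetD nums i 0 = x := ⟨hlt, by rw [hget, hxy]⟩
      rw [pvInner, if_pos hcond]
      rw [ih f (i + 1) (count + 1) (by simpa using hf) (by omega) hd']
      simp [pvLead, hxy]
      constructor <;> push_cast <;> ring
    · have hni : ¬ (i < (nums.length : Int) ∧ PySem.List.pyGetD nums i 0 = x) := by
        rw [hget]; tauto
      simp [pvInner, hni, pvLead, hxy]

theorem pvOuter_eq (nums : List Int) :
    ∀ (n : Nat) (s : List Int) (fuel : Nat) (i mx : Int), s.length ≤ n → s.length ≤ fuel →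
    0 ≤ i → 0 ≤ mx → nums.drop i.toNat = s →
    pvOuter nums (nums.length : Int) fuel i mx = max mx (pvMrl s) := by
  intro n
  induction n with
  | zero =>
    intro s fuel i mx hn _hf h0 hmx hd
    have hs : s = [] := by cases s <;> simp_all
    subst hs
    have hlen : nums.length ≤ i.toNat := by
      by_contra h
      have := List.drop_eq_nil_iff.mp hd
      omega
    have hneg : ¬ (i < (nums.length : Int) ∧ (nums.length : Int) - i > mx) := by omega
    have hres : pvOuter nums (nums.length : Int) fuel i mx = mx := by
      cases fuel with
      | zero => simp [pvOuter]
      | succ f => simp [pvOuter, hneg]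
    rw [hres]
    simp [pvMrl, max_eq_left hmx]
  | succ n ih =>
    intro s fuel i mx hn hf h0 hmx hd
    have hslen : s.length = nums.length - i.toNat := by
      rw [← hd]; simp
    by_cases hc : i < (nums.length : Int) ∧ (nums.length : Int) - i > mx
    · obtain ⟨y, ys, rfl⟩ : ∃ y ys, s = y :: ys := by
        cases s with
        | nil =>
          exfalso
          have := List.drop_eq_nil_iff.mp hd
          omega
        | cons y ys => exact ⟨y, ys, rfl⟩
      have hget : PySem.List.pyGetD nums i 0 = y := by
        rw [PySem.List.pyGetD_eq_getElem nums 0 h0 (by exact_mod_cast hc.1)]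
        have h1 : i.toNat < nums.length := by omega
        have : nums[i.toNat] = (nums.drop i.toNat)[0]'(by rw [hd]; simp) := by simp
        rw [this]
        simp [hd]
      have hd1 : nums.drop (i + 1).toNat = ys := by
        have h2 : (nums.drop i.toNat).tail = ys := by rw [hd]; rfl
        rw [List.tail_drop] at h2
        rw [show (i + 1).toNat = i.toNat + 1 from by omega]
        exact h2
      obtain ⟨f, rfl⟩ : ∃ f, fuel = f + 1 := by
        cases fuel with
        | zero => simp at hf
        | succ f => exact ⟨f, rfl⟩
      have hys_le : ys.length ≤ nums.length := by
        have := congrArg List.length hd1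
        simp at this
        omega
      have hinner := pvInner_eq nums y ys nums.length (i + 1) 1 hys_le (by omega) hd1
      rw [pvOuter, if_pos hc]
      simp only [hget, hinner]
      set k : Int := (pvLead y ys : Int) with hk
      have hk0 : 0 ≤ k := by positivity
      have hd2 : nums.drop (i + 1 + k).toNat = pvRest y ys := by
        have h4 : List.drop (1 + pvLead y ys) (List.drop i.toNat nums)
            = List.drop ((i + 1 + k).toNat) nums := by
          rw [List.drop_drop]
          congr 1
          omega
        rw [← h4, hd, show 1 + pvLead y ys = pvLead y ys + 1 from by omega,
          List.drop_succ_cons]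
        exact (pvRest_eq_drop y ys).symm
      have hrest_le : (pvRest y ys).length ≤ n := by
        have := pvRest_length_le y ys
        simp at hn
        omega
      have hrest_fuel : (pvRest y ys).length ≤ f := by
        have := pvRest_length_le y ys
        simp at hf
        omega
      have hrec := ih (pvRest y ys) f (i + 1 + k) (if 1 + k > mx then 1 + k else mx)
        hrest_le hrest_fuel (by omega) (by split <;> omega) hd2
      rw [hrec]
      have hmrl : pvMrl (y :: ys) = max (k + 1) (pvMrl (pvRest y ys)) := by
        rw [pvMrl]
      rw [hmrl]
      simp only [max_def]
      split_ifs <;> omega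
    · have hres : pvOuter nums (nums.length : Int) fuel i mx = mx := by
        cases fuel with
        | zero => simp [pvOuter]
        | succ f => simp [pvOuter, hc]
      rw [hres]
      have hle := pvMrl_le_len s
      have h0m := pvMrl_nonneg s
      simp only [max_def]
      split_ifs <;> omega

theorem homework_1_eq_mrl (nums : List Int) : homework_1 nums = pvMrl nums := by
  unfold homework_1
  have hlen : PySem.List.len nums = (nums.length : Int) := by
    simp [PySem.List.len]
  rw [hlen, pvOuter_eq nums nums.length nums (nums.length + 1) 0 0 (le_refl _) (by omega)
    (le_refl _) (le_refl _) (by simp)]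
  have := pvMrl_nonneg nums
  omega

-- ===== B-side characterisation =====
def pvBuild (x c : Int) : List Int → List (Int × Int)
  | [] => [(x, c)]
  | y :: ys => if y = x then pvBuild x (c + 1) ys else (x, c) :: pvBuild y 1 ys

theorem pvBuild_ne_nil (x c : Int) (l : List Int) : pvBuild x c l ≠ [] := by
  cases l with
  | nil => simp [pvBuild]
  | cons y ys => by_cases h : y = x <;> simp [pvBuild, h] <;> exact pvBuild_ne_nil x (c + 1) ys

theorem foldl_pvStep (l : List Int) :
    ∀ (rs : List (Int × Int)) (x c : Int),
    l.foldl pvStep (rs ++ [(x, c)]) = rs ++ pvBuild x c l := by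
  induction l with
  | nil => intro rs x c; simp [pvBuild]
  | cons y ys ih =>
    intro rs x c
    rw [List.foldl_cons]
    have hstep : pvStep (rs ++ [(x, c)]) y =
        if x = y then rs ++ [(y, c + 1)] else (rs ++ [(x, c)]) ++ [(y, 1)] := by
      unfold pvStep
      rw [List.getLast?_concat]
      split <;> simp_all [List.dropLast_concat]
    by_cases hxy : x = y
    · rw [hstep, if_pos hxy, ih rs y (c + 1)]
      subst hxy
      simp [pvBuild]
    · rw [hstep, if_neg hxy, ih (rs ++ [(x, c)]) y 1]
      have : ¬ (y = x) := fun h => hxy h.symm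
      simp [pvBuild, this]

def pvMaxSnd (rs : List (Int × Int)) : Int :=
  (PySem.List.max? (rs.map (fun r => r.2)) (fun c => c)).getD 0

theorem foldl_max_max (l : List Int) : ∀ (a b : Int), l.foldl max (max a b) = max a (l.foldl max b) := by
  induction l with
  | nil => intro a b; simp
  | cons c t ih =>
    intro a b
    simp only [List.foldl_cons]
    rw [max_assoc, ih]

theorem pvMaxSnd_cons (p : Int × Int) (rs : List (Int × Int)) (h : rs ≠ []) :
    pvMaxSnd (p :: rs) = max p.2 (pvMaxSnd rs) := by
  obtain ⟨q, t, rfl⟩ : ∃ q t, rs = q :: t := by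
    cases rs with
    | nil => exact absurd rfl h
    | cons q t => exact ⟨q, t, rfl⟩
  unfold pvMaxSnd
  simp only [List.map_cons]
  rw [PySem.List.max?_id_cons, PySem.List.max?_id_cons]
  simp only [List.foldl_cons, Option.getD_some]
  rw [foldl_max_max]

theorem pvMaxSnd_build (l : List Int) :
    ∀ (x c : Int), 1 ≤ c →
    pvMaxSnd (pvBuild x c l) = max (c + (pvLead x l : Int)) (pvMrl (pvRest x l)) := by
  induction l with
  | nil =>
    intro x c hc
    simp only [pvBuild, pvLead, pvRest, pvMrl]
    unfold pvMaxSnd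
    simp only [List.map_cons, List.map_nil]
    rw [PySem.List.max?_id_cons]
    simp
    omega
  | cons y ys ih =>
    intro x c hc
    by_cases hxy : y = x
    · simp only [pvBuild, pvLead, pvRest, if_pos hxy]
      rw [ih x (c + 1) (by omega)]
      congr 1
      push_cast
      ring
    · simp only [pvBuild, pvLead, pvRest, if_neg hxy]
      rw [pvMaxSnd_cons _ _ (pvBuild_ne_nil y 1 ys), ih y 1 (le_refl 1)]
      have hmrl : pvMrl (y :: ys) = max ((pvLead y ys : Int) + 1) (pvMrl (pvRest y ys)) := by
        rw [pvMrl]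
      rw [← add_comm 1 ((pvLead y ys : Int))] at hmrl
      rw [← hmrl]
      simp

theorem homework_1_alt_eq_mrl (nums : List Int) : homework_1_alt nums = pvMrl nums := by
  cases nums with
  | nil =>
    unfold homework_1_alt pvMrl
    simp [PySem.List.max?]
  | cons x ys =>
    unfold homework_1_alt
    have hstep : pvStep [] x = [] ++ [(x, 1)] := by simp [pvStep]
    simp only [List.foldl_cons, hstep]
    rw [foldl_pvStep ys [] x 1]
    show pvMaxSnd (pvBuild x 1 ys) = pvMrl (x :: ys)
    rw [pvMaxSnd_build ys x 1 (le_refl 1), pvMrl]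
    congr 1
    ring

-- ===== VERDICT (by name: the statement is the Claim_ definition above) =====
theorem homework_1_spec : Claim_equal_homework_1 := by
  intro nums _
  unfold Spec_homework_1
  rw [homework_1_eq_mrl, homework_1_alt_eq_mrl]
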